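-- pv_equiv track=rewrite | github.com/NeedtoLearn/codejam | saving_universe.py | calculate_total_attacks
-- ===== SOURCE A (Python) =====
-- def calculate_total_attacks(P):
--     damage = 1
--     total_attacks = 0
--     for c in P:
--         if c == 'C':
--             damage *= 2
--         else:
--             total_attacks += damage
--     return total_attacks
-- ===== SOURCE B (Python) =====
-- def calculate_total_attacks(P):
--     total = 0
--     for c in reversed(P):
--         if c == 'C':
--             total *= 2
--         else:
--             total += 1
--     return total
-- ===== Notes on version B (the rewrite author's own statement) =====
-- stated objective: alternative
-- what changed: B iterates the string in reverse with a single accumulator (a 'C' doubles the running total, any other char adds 1), replacing A's forward pass that maintains a separate doubling damage multiplier plus a total.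
import Mathlib
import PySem

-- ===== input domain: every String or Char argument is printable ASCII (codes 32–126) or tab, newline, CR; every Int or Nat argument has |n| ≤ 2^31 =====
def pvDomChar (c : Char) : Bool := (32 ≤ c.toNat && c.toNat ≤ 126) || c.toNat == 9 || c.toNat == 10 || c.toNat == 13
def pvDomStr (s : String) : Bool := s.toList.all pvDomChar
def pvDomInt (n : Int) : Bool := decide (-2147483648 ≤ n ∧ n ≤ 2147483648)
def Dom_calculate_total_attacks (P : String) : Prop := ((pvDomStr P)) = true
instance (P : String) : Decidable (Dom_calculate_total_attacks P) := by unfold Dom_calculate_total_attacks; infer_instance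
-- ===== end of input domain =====

-- B iterates the string in reverse with a single accumulator (a 'C' doubles the
-- running total, any other char adds 1), instead of A's forward pass keeping a
-- damage multiplier and a separate total; same O(n) cost (objective: alternative).

-- ===== PORT A =====
-- forward loop carrying (damage, total_attacks)
def calculate_total_attacks (P : String) : Int :=
  (P.toList.foldl
    (fun (st : Int × Int) c =>
      if c == 'C' then (st.1 * 2, st.2) else (st.1, st.2 + st.1))
    (1, 0)).2

-- ===== PORT B =====
-- loop over reversed(P) with a single accumulator
def calculate_total_attacks_alt (P : String) : Int :=
  P.toList.reverse.foldl
    (fun (total : Int) c => if c == 'C' then total * 2 else total + 1) 0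

-- ===== PRECONDITION & SPEC =====
def Spec_calculate_total_attacks (P : String) (out : Int) : Prop := out = calculate_total_attacks_alt P
instance (P : String) (out : Int) : Decidable (Spec_calculate_total_attacks P out) := by unfold Spec_calculate_total_attacks; infer_instance

-- ===== CLAIM (what is proved, stated in full; the proofs are below) =====
def Claim_equal_calculate_total_attacks : Prop := ∀ (P : String), Dom_calculate_total_attacks P → Spec_calculate_total_attacks P (calculate_total_attacks P)

-- ===== LEMMAS AND PROOFS =====

-- A's fold from any state (d, t): the final total is t + d * (B's foldr form).
theorem pv_fold_eq (l : List Char) : ∀ (d t : Int),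
    (l.foldl (fun (st : Int × Int) c =>
        if c == 'C' then (st.1 * 2, st.2) else (st.1, st.2 + st.1)) (d, t)).2
      = t + d * (l.foldr (fun c (total : Int) =>
          if c == 'C' then total * 2 else total + 1) 0) := by
  induction l with
  | nil => intro d t; simp
  | cons c rest ih =>
    intro d t
    cases hb : (c == 'C') <;>
      simp only [List.foldl_cons, List.foldr_cons, hb, Bool.false_eq_true, if_true, if_false] <;>
      rw [ih] <;> ring

theorem pv_main (P : String) :
    calculate_total_attacks P = calculate_total_attacks_alt P := by
  unfold calculate_total_attacks calculate_total_attacks_alt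
  rw [List.foldl_reverse, pv_fold_eq]
  simp

-- ===== VERDICT (by name: the statement is the Claim_ definition above) =====
theorem calculate_total_attacks_spec : Claim_equal_calculate_total_attacks := by
  intro P _
  exact pv_main P
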